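-- pv_equiv track=rewrite | github.com/Edge-Intelligence-Lab/ChatDKU | chatdku/chatdku/core/tools/syllabi_tool/sql_agent.py | sanitize_sql
-- ===== SOURCE A (Python) =====
-- def sanitize_sql(sql):
--     sql = sql.strip().lower()
--     altering_keywords = [
--         "insert",
--         "update",
--         "delete",
--         "drop",
--         "truncate",
--         "alter",
--         "create",
--         "replace",
--         "grant",
--         "revoke",
--         "comment",
--         "rename",
--         "set",
--         "copy",
--         "vacuum",
--         "analyze",
--     ]
--
--     for keyword in altering_keywords:
--         # match full words only to avoid substring match (e.g., 'create' in 'recreate')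
--         if f" {keyword} " in f" {sql} ":
--             return "SELECT 'UNAUTHORIZED';"
--
--     return sql
-- ===== SOURCE B (Python) =====
-- def sanitize_sql(sql):
--     sql = sql.strip().lower()
--     altering_keywords = {
--         "insert", "update", "delete", "drop", "truncate", "alter",
--         "create", "replace", "grant", "revoke", "comment", "rename",
--         "set", "copy", "vacuum", "analyze",
--     }
--     tokens = set(sql.split(" "))
--     if altering_keywords.isdisjoint(tokens):
--         return sql
--     return "SELECT 'UNAUTHORIZED';"
-- ===== Notes on version B (the rewrite author's own statement) =====
-- stated objective: idiomatic
-- what changed: A scans the whole padded query once per keyword (16 substring searches); B tokenizes the query once on single spaces and tests the fixed keyword set for disjointness with the token set, so the per-keyword scans disappear.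
import Mathlib
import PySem

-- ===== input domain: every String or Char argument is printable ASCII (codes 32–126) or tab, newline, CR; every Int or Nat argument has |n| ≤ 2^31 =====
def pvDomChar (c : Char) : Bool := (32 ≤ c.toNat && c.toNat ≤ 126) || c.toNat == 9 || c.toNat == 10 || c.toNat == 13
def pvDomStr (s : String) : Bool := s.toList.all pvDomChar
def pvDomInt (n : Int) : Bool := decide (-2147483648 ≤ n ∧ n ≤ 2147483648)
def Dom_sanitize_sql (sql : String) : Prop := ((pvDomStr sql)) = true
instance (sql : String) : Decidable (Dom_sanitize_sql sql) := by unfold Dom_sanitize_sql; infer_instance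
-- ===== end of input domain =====

-- B replaces A's sixteen padded-substring scans of the whole query by a single split(" ")
-- tokenization and one set-disjointness test against the keyword set (idiomatic; same value).

-- ===== PORT A =====

-- the keyword collection (a list literal in A, a set literal in B; same 16 words)
def pvKeywords : List (List Char) :=
  ["insert".toList, "update".toList, "delete".toList, "drop".toList,
   "truncate".toList, "alter".toList, "create".toList, "replace".toList,
   "grant".toList, "revoke".toList, "comment".toList, "rename".toList,
   "set".toList, "copy".toList, "vacuum".toList, "analyze".toList]

-- the for-loop of A: try each keyword in order, early-return on a padded-substring hit
def pvLoopA (s : List Char) : List (List Char) → String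
  | [] => String.ofList s
  | kw :: rest =>
      if PySem.Chars.isIn (' ' :: kw ++ [' ']) (' ' :: s ++ [' ']) then "SELECT 'UNAUTHORIZED';"
      else pvLoopA s rest

def sanitize_sql (sql : String) : String :=
  let s := PySem.Chars.lower (PySem.Chars.strip sql.toList)
  pvLoopA s pvKeywords

-- ===== PORT B =====
def sanitize_sql_alt (sql : String) : String :=
  let s := PySem.Chars.lower (PySem.Chars.strip sql.toList)
  let tokens := PySem.Set.ofList (s.splitOn ' ')
  if PySem.Set.isdisjoint (PySem.Set.ofList pvKeywords) tokens then String.ofList s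
  else "SELECT 'UNAUTHORIZED';"

-- ===== PRECONDITION & SPEC =====
def Spec_sanitize_sql (sql : String) (out : String) : Prop := out = sanitize_sql_alt sql
instance (sql : String) (out : String) : Decidable (Spec_sanitize_sql sql out) := by unfold Spec_sanitize_sql; infer_instance

-- ===== CLAIM (what is proved, stated in full; the proofs are below) =====
def Claim_equal_sanitize_sql : Prop := ∀ (sql : String), Dom_sanitize_sql sql → Spec_sanitize_sql sql (sanitize_sql sql)

-- ===== LEMMAS AND PROOFS =====

-- skipping a space-free prefix cannot lose an occurrence of the padded word
lemma pv_skip (w a s : List Char) (ha : ' ' ∉ a) :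
    ((' ' :: (w ++ [' '])) <:+: a ++ s) ↔ ((' ' :: (w ++ [' '])) <:+: s) := by
  induction a with
  | nil => simp
  | cons c a ih =>
    have hc : c ≠ ' ' := fun h => ha (h ▸ List.mem_cons_self)
    have ha' : ' ' ∉ a := fun h => ha (List.mem_cons_of_mem c h)
    simp only [List.cons_append]
    rw [List.infix_cons_iff, ih ha']
    constructor
    · rintro (hp | h)
      · rw [List.cons_prefix_cons] at hp
        exact absurd hp.1.symm hc
      · exact h
    · exact Or.inr

-- a padded word is a prefix of a padded space-free segment iff it equals the segment
lemma pv_prefix (w : List Char) (hw : ' ' ∉ w) :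
    ∀ (a s : List Char), ' ' ∉ a → ((w ++ [' '] <+: a ++ ' ' :: s) ↔ w = a) := by
  induction w with
  | nil =>
    intro a s ha
    cases a with
    | nil => simp
    | cons d a' =>
      have hd : d ≠ ' ' := fun h => ha (h ▸ List.mem_cons_self)
      simp [List.cons_prefix_cons, eq_comm, hd]
  | cons c w' ih =>
    have hc : c ≠ ' ' := fun h => hw (h ▸ List.mem_cons_self)
    have hw' : ' ' ∉ w' := fun h => hw (List.mem_cons_of_mem c h)
    intro a s ha
    cases a with
    | nil => simp [List.cons_prefix_cons, hc]
    | cons d a' =>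
      have ha' : ' ' ∉ a' := fun h => ha (List.mem_cons_of_mem d h)
      simp [List.cons_prefix_cons, ih hw' a' s ha']

-- the core fact: the padded word " w " occurs in " t " iff w is a space-separated token of t
lemma pv_occ (w : List Char) (hw : ' ' ∉ w) :
    ∀ (n : Nat) (t : List Char), t.length ≤ n →
      (((' ' :: (w ++ [' '])) <:+: (' ' :: (t ++ [' ']))) ↔ w ∈ t.splitOn ' ') := by
  intro n
  induction n with
  | zero =>
    intro t ht
    have ht0 : t = [] := List.eq_nil_of_length_eq_zero (Nat.le_zero.mp ht)
    subst ht0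
    simp only [List.nil_append, List.splitOn_nil, List.mem_singleton]
    rw [List.infix_cons_iff]
    constructor
    · rintro (hp | h)
      · rw [List.cons_prefix_cons] at hp
        have hl := hp.2.length_le
        simp only [List.length_append, List.length_cons, List.length_nil] at hl
        exact List.eq_nil_of_length_eq_zero (by omega)
      · exfalso
        have hl := h.length_le
        simp only [List.length_append, List.length_cons, List.length_nil] at hl
        omega
    · intro hmem
      subst hmem
      simp
  | succ n ih =>
    intro t ht
    by_cases hsp : ' ' ∈ t
    · -- first space: t = a ++ ' ' :: b with ' ' ∉ a
      set p : Char → Bool := fun c => !(c == ' ') with hp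
      have hsplit : t.takeWhile p ++ t.dropWhile p = t := List.takeWhile_append_dropWhile
      have ha : ' ' ∉ t.takeWhile p := by
        intro h
        have := List.mem_takeWhile_imp h
        simp [hp] at this
      have hdrop_ne : t.dropWhile p ≠ [] := by
        intro h
        rw [← hsplit, List.mem_append, h] at hsp
        simp only [List.not_mem_nil, or_false] at hsp
        exact ha hsp
      obtain ⟨c, b, hcb⟩ := List.exists_cons_of_ne_nil hdrop_ne
      have hc : c = ' ' := by
        have hh := List.head_dropWhile_not (l := t) p hdrop_ne
        have hhead : (List.dropWhile p t).head hdrop_ne = c := by simp [hcb]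
        rw [hhead] at hh
        simp [hp] at hh
        exact hh
      set a := t.takeWhile p with hadef
      have hteq : t = a ++ ' ' :: b := by rw [← hsplit, hcb, hc]
      have hblen : b.length ≤ n := by
        have : t.length = a.length + (b.length + 1) := by rw [hteq]; simp
        omega
      have hsplitOn : t.splitOn ' ' = a :: b.splitOn ' ' := by
        rw [hteq]
        simp only [List.splitOn]
        exact List.splitOnP_first _ a
          (fun x hx h => by simp at h; subst h; exact ha hx) ' ' (by simp) b
      rw [hsplitOn, hteq]
      simp only [List.append_assoc, List.cons_append]
      rw [List.infix_cons_iff]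
      constructor
      · rintro (hpp | h)
        · rw [List.cons_prefix_cons] at hpp
          have := (pv_prefix w hw a (b ++ [' ']) ha).mp hpp.2
          simp [this]
        · have h2 : (' ' :: (w ++ [' '])) <:+: (' ' :: (b ++ [' '])) :=
            (pv_skip w a (' ' :: (b ++ [' '])) ha).mp h
          have := (ih b hblen).mp h2
          simp [this]
      · intro hmem
        rcases List.mem_cons.mp hmem with heq | hmem'
        · left
          rw [List.cons_prefix_cons]
          exact ⟨rfl, (pv_prefix w hw a (b ++ [' ']) ha).mpr heq⟩
        · right
          exact (pv_skip w a (' ' :: (b ++ [' '])) ha).mpr ((ih b hblen).mpr hmem')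
    · -- no space in t
      have hsplitOn : t.splitOn ' ' = [t] := by
        simp only [List.splitOn]
        exact List.splitOnP_eq_single _ t (fun x hx h => by simp at h; subst h; exact hsp hx)
      rw [hsplitOn, List.mem_singleton]
      rw [List.infix_cons_iff]
      constructor
      · rintro (hpp | h)
        · rw [List.cons_prefix_cons] at hpp
          exact (pv_prefix w hw t [] hsp).mp hpp.2
        · exfalso
          have h2 : (' ' :: (w ++ [' '])) <:+: ([' '] : List Char) :=
            (pv_skip w t [' '] hsp).mp h
          have hl := h2.length_le
          simp only [List.length_append, List.length_cons, List.length_nil] at hl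
          omega
      · intro hmem
        subst hmem
        left
        rw [List.cons_prefix_cons]
        exact ⟨rfl, (pv_prefix w hw w [] hw).mpr rfl⟩

-- A's early-return loop, characterised by token membership
lemma pv_loop (s : List Char) :
    ∀ kws : List (List Char), (∀ kw ∈ kws, ' ' ∉ kw) →
      pvLoopA s kws =
        if kws.any (fun kw => decide (kw ∈ s.splitOn ' ')) then "SELECT 'UNAUTHORIZED';"
        else String.ofList s := by
  intro kws
  induction kws with
  | nil => intro _; simp [pvLoopA]
  | cons kw rest ih =>
    intro h
    have hkw : ' ' ∉ kw := h kw List.mem_cons_self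
    have hrest : ∀ k ∈ rest, ' ' ∉ k := fun k hk => h k (List.mem_cons_of_mem kw hk)
    rw [pvLoopA]
    simp only [List.cons_append]
    by_cases hmem : kw ∈ s.splitOn ' '
    · have hin : PySem.Chars.isIn (' ' :: (kw ++ [' '])) (' ' :: (s ++ [' '])) = true := by
        rw [PySem.Chars.isIn_iff_infix]
        exact (pv_occ kw hkw s.length s le_rfl).mpr hmem
      simp [hin, hmem]
    · have hin : PySem.Chars.isIn (' ' :: (kw ++ [' '])) (' ' :: (s ++ [' '])) = false := by
        rw [Bool.eq_false_iff, Ne, PySem.Chars.isIn_iff_infix]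
        exact fun h2 => hmem ((pv_occ kw hkw s.length s le_rfl).mp h2)
      simp [hin, hmem, ih hrest]

lemma pv_kw_space_free : ∀ kw ∈ pvKeywords, ' ' ∉ kw := by decide

-- ===== VERDICT (by name: the statement is the Claim_ definition above) =====
theorem sanitize_sql_spec : Claim_equal_sanitize_sql := by
  intro sql _
  unfold Spec_sanitize_sql sanitize_sql sanitize_sql_alt
  set s := PySem.Chars.lower (PySem.Chars.strip sql.toList) with hs
  rw [pv_loop s pvKeywords pv_kw_space_free]
  by_cases hdis : PySem.Set.isdisjoint (PySem.Set.ofList pvKeywords) (PySem.Set.ofList (s.splitOn ' ')) = true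
  · have hnone : ∀ kw ∈ pvKeywords, kw ∉ s.splitOn ' ' := by
      intro kw hkw hmem
      exact (PySem.Set.isdisjoint_iff _ _).mp hdis kw
        ((PySem.Set.mem_ofList _ _).mpr hkw) ((PySem.Set.mem_ofList _ _).mpr hmem)
    have hany : pvKeywords.any (fun kw => decide (kw ∈ s.splitOn ' ')) = false := by
      rw [List.any_eq_false]
      intro kw hkw
      simp [hnone kw hkw]
    simp [hany, hdis]
  · have hex : ∃ kw ∈ pvKeywords, kw ∈ s.splitOn ' ' := by
      have h1 : ¬ ∀ x ∈ PySem.Set.ofList pvKeywords, x ∉ PySem.Set.ofList (s.splitOn ' ') :=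
        fun hall => hdis ((PySem.Set.isdisjoint_iff _ _).mpr hall)
      rcases not_forall.mp h1 with ⟨x, hx⟩
      rcases Classical.not_imp.mp hx with ⟨hx1, hx2⟩
      exact ⟨x, (PySem.Set.mem_ofList _ _).mp hx1,
        (PySem.Set.mem_ofList _ _).mp (not_not.mp hx2)⟩
    obtain ⟨kw, hkw, hmem⟩ := hex
    have hany : pvKeywords.any (fun kw => decide (kw ∈ s.splitOn ' ')) = true := by
      rw [List.any_eq_true]
      exact ⟨kw, hkw, by simp [hmem]⟩
    simp [hany, hdis]
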